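-- pv_equiv track=rewrite | github.com/Joshua-K-Johnson/piCalculator | app.py | highlight_pi_difference
-- ===== SOURCE A (Python) =====
-- def highlight_pi_difference(user_pi, reference_pi, digits):
--     result_html = '<code>'
--     max_len = min(len(user_pi), len(reference_pi))
--     for i in range(digits + 2):  # Include "3."
--         if i >= max_len:
--             result_html += '<span style="color:gray;">?</span>'
--             break
--         if user_pi[i] == reference_pi[i]:
--             result_html += user_pi[i]
--         else:
--             result_html += f'<span style="color:red;">{user_pi[i]}</span>'
--             remaining = user_pi[i+1:digits + 20]
--             result_html += f'<span style="color:gray;">{remaining}</span>'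
--             break
--     result_html += '</code>'
--     return result_html
-- ===== SOURCE B (Python) =====
-- def highlight_pi_difference(user_pi, reference_pi, digits):
--     # Locate-then-slice: find the first differing position, then build the HTML from slices.
--     max_len = min(len(user_pi), len(reference_pi))
--     hi = min(digits + 2, max_len)
--     diff = next((i for i in range(hi) if user_pi[i] != reference_pi[i]), None)
--     if diff is not None:
--         return ('<code>' + user_pi[:diff]
--                 + f'<span style="color:red;">{user_pi[diff]}</span>'
--                 + f'<span style="color:gray;">{user_pi[diff + 1:digits + 20]}</span>'
--                 + '</code>')
--     if max_len < digits + 2: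
--         return '<code>' + user_pi[:max_len] + '<span style="color:gray;">?</span></code>'
--     return '<code>' + user_pi[:max(digits + 2, 0)] + '</code>'
-- ===== Notes on version B (the rewrite author's own statement) =====
-- stated objective: simpler
-- what changed: Replaces the char-by-char HTML accumulation loop (with two in-loop break branches) by a locate-then-slice construction: first find the index of the first differing character, then build the whole HTML string from string slices in one of three return expressions.
import Mathlib
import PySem

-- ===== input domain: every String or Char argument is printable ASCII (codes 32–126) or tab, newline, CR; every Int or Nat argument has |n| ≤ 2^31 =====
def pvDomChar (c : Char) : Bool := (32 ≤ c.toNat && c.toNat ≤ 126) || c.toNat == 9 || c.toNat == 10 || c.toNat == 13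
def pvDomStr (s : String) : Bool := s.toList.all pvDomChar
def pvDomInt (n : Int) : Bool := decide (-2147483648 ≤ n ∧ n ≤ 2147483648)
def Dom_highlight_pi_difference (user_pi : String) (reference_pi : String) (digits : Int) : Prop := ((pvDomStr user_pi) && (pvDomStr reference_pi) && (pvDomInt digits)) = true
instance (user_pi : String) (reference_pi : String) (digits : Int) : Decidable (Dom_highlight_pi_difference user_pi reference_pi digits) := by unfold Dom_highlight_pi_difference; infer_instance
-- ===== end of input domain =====

-- B replaces A's char-by-char HTML accumulation loop by a locate-then-slice construction
-- (find the first differing index, then build the HTML from string slices); objective: simpler.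

-- ===== PORT A =====
-- the 'for i in range(digits + 2)' loop; fuel k = remaining iterations, i = current index.
-- u[i] / r[i] are in range whenever read (i < maxLen ≤ length), so List.getD is exact there.
def hpdLoopA (u r : List Char) (digits : Int) (maxLen : Nat) : Nat → Nat → List Char
  | 0, _ => []
  | k+1, i =>
    if maxLen ≤ i then
      "<span style=\"color:gray;\">?</span>".toList
    else if u.getD i ' ' = r.getD i ' ' then
      u.getD i ' ' :: hpdLoopA u r digits maxLen k (i+1)
    else
      "<span style=\"color:red;\">".toList ++ [u.getD i ' '] ++ "</span>".toList
        ++ "<span style=\"color:gray;\">".toList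
        ++ PySem.List.slice u (some ((i : Int) + 1)) (some (digits + 20))
        ++ "</span>".toList

def highlight_pi_difference (user_pi : String) (reference_pi : String) (digits : Int) : String :=
  String.ofList ("<code>".toList
    ++ hpdLoopA user_pi.toList reference_pi.toList digits
         (min user_pi.toList.length reference_pi.toList.length) (digits + 2).toNat 0
    ++ "</code>".toList)

-- ===== PORT B =====
-- first differing index in [i, hi): port of next((i for i in range(hi) if u[i] != r[i]), None);
-- range over a non-positive bound is empty, so hi = min(digits + 2, max_len) is taken as a Nat via toNat.
def hpdFirstDiff (u r : List Char) (hi : Nat) (i : Nat) : Option Nat :=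
  if i < hi then
    (if u.getD i ' ' ≠ r.getD i ' ' then some i else hpdFirstDiff u r hi (i+1))
  else none
termination_by hi - i

def highlight_pi_difference_alt (user_pi : String) (reference_pi : String) (digits : Int) : String :=
  match hpdFirstDiff user_pi.toList reference_pi.toList
      (min (digits + 2) ((min user_pi.toList.length reference_pi.toList.length : Nat) : Int)).toNat 0 with
  | some d =>
      String.ofList ("<code>".toList
        ++ PySem.List.slice user_pi.toList none (some (d : Int))
        ++ "<span style=\"color:red;\">".toList ++ [user_pi.toList.getD d ' '] ++ "</span>".toList
        ++ "<span style=\"color:gray;\">".toList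
        ++ PySem.List.slice user_pi.toList (some ((d : Int) + 1)) (some (digits + 20))
        ++ "</span>".toList
        ++ "</code>".toList)
  | none =>
      if ((min user_pi.toList.length reference_pi.toList.length : Nat) : Int) < digits + 2 then
        String.ofList ("<code>".toList
          ++ PySem.List.slice user_pi.toList none
               (some ((min user_pi.toList.length reference_pi.toList.length : Nat) : Int))
          ++ "<span style=\"color:gray;\">?</span>".toList
          ++ "</code>".toList)
      else
        String.ofList ("<code>".toList
          ++ PySem.List.slice user_pi.toList none (some (max (digits + 2) 0))
          ++ "</code>".toList)

-- ===== PRECONDITION & SPEC =====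
def Spec_highlight_pi_difference (user_pi : String) (reference_pi : String) (digits : Int) (out : String) : Prop := out = highlight_pi_difference_alt user_pi reference_pi digits
instance (user_pi : String) (reference_pi : String) (digits : Int) (out : String) : Decidable (Spec_highlight_pi_difference user_pi reference_pi digits out) := by unfold Spec_highlight_pi_difference; infer_instance

-- ===== CLAIM (what is proved, stated in full; the proofs are below) =====
def Claim_equal_highlight_pi_difference : Prop := ∀ (user_pi : String) (reference_pi : String) (digits : Int), Dom_highlight_pi_difference user_pi reference_pi digits → Spec_highlight_pi_difference user_pi reference_pi digits (highlight_pi_difference user_pi reference_pi digits)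

-- ===== LEMMAS AND PROOFS =====

-- rendering of the tail of the output, as B computes it (proof-only helper)
def hpdRender (u : List Char) (digits : Int) (maxLen i k : Nat) : Option Nat → List Char
  | some d => (u.drop i).take (d - i)
      ++ "<span style=\"color:red;\">".toList ++ [u.getD d ' '] ++ "</span>".toList
      ++ "<span style=\"color:gray;\">".toList
      ++ PySem.List.slice u (some ((d : Int) + 1)) (some (digits + 20))
      ++ "</span>".toList
  | none =>
      if maxLen < i + k then
        (u.drop i).take (maxLen - i) ++ "<span style=\"color:gray;\">?</span>".toList
      else
        (u.drop i).take k

lemma hpdFirstDiff_ge_aux (u r : List Char) (hi : Nat) :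
    ∀ n i d, hi - i ≤ n → hpdFirstDiff u r hi i = some d → i ≤ d := by
  intro n
  induction n with
  | zero =>
      intro i d hn h
      have hge : ¬ i < hi := by omega
      unfold hpdFirstDiff at h
      rw [if_neg hge] at h
      simp at h
  | succ n ih =>
      intro i d hn h
      unfold hpdFirstDiff at h
      by_cases hlt : i < hi
      · rw [if_pos hlt] at h
        by_cases hEq : u.getD i ' ' = r.getD i ' '
        · rw [if_neg (not_not_intro hEq)] at h
          have := ih (i+1) d (by omega) h
          omega
        · rw [if_pos hEq] at h
          injection h with h'
          omega
      · rw [if_neg hlt] at h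
        simp at h

lemma hpdFirstDiff_ge (u r : List Char) (hi i d : Nat)
    (h : hpdFirstDiff u r hi i = some d) : i ≤ d :=
  hpdFirstDiff_ge_aux u r hi (hi - i) i d le_rfl h

-- Loop invariant: A's loop from index i with fuel k equals B's locate-then-slice rendering
-- of the corresponding tail.
lemma hpdLoopA_eq (u r : List Char) (digits : Int) (maxLen : Nat)
    (hml : maxLen ≤ u.length) :
    ∀ k i, i ≤ maxLen →
    hpdLoopA u r digits maxLen k i =
      hpdRender u digits maxLen i k (hpdFirstDiff u r (min (i + k) maxLen) i) := by
  intro k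
  induction k with
  | zero =>
      intro i hi
      have hc : ¬ i < min (i + 0) maxLen := by omega
      have h1 : hpdFirstDiff u r (min (i + 0) maxLen) i = none := by
        unfold hpdFirstDiff; rw [if_neg hc]
      rw [h1]
      have h2 : ¬ maxLen < i + 0 := by omega
      simp only [hpdRender, if_neg h2, List.take_zero, hpdLoopA]
  | succ k ih =>
      intro i hi
      by_cases hgt : maxLen ≤ i
      · have hc : ¬ i < min (i + (k+1)) maxLen := by omega
        have h1 : hpdFirstDiff u r (min (i + (k+1)) maxLen) i = none := by
          unfold hpdFirstDiff; rw [if_neg hc]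
        rw [h1]
        have h2 : maxLen < i + (k+1) := by omega
        have h3 : maxLen - i = 0 := by omega
        simp only [hpdRender, if_pos h2, h3, List.take_zero, List.nil_append, hpdLoopA,
          if_pos hgt]
      · have hni : ¬ maxLen ≤ i := hgt
        have hlt : i < maxLen := by omega
        have hiu : i < u.length := by omega
        have hdrop : u.drop i = u[i] :: u.drop (i+1) := List.drop_eq_getElem_cons hiu
        have hgd : u.getD i ' ' = u[i] := by simp [List.getD, hiu]
        have hc : i < min (i + (k+1)) maxLen := by omega
        by_cases heq : u.getD i ' ' = r.getD i ' '
        · -- matching character: step once, use the IH at i+1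
          have hmm : min (i + (k+1)) maxLen = min ((i+1) + k) maxLen := by omega
          have h1 : hpdFirstDiff u r (min (i + (k+1)) maxLen) i
              = hpdFirstDiff u r (min ((i+1) + k) maxLen) (i+1) := by
            conv_lhs => unfold hpdFirstDiff
            rw [if_pos hc, if_neg (not_not_intro heq), hmm]
          have hLHS : hpdLoopA u r digits maxLen (k+1) i
              = u.getD i ' ' :: hpdLoopA u r digits maxLen k (i+1) := by
            simp only [hpdLoopA, if_neg hni, if_pos heq]
          rw [h1, hLHS, ih (i+1) (by omega)]
          cases hfd : hpdFirstDiff u r (min ((i+1) + k) maxLen) (i+1) with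
          | some d =>
              have hd : i + 1 ≤ d := hpdFirstDiff_ge u r _ _ _ hfd
              have htk : (u.drop i).take (d - i) = u[i] :: (u.drop (i+1)).take (d - (i+1)) := by
                rw [hdrop]
                have hsub : d - i = (d - (i+1)) + 1 := by omega
                rw [hsub, List.take_succ_cons]
              simp only [hpdRender, htk, hgd, List.cons_append]
          | none =>
              simp only [hpdRender]
              by_cases hcc : maxLen < i + 1 + k
              · have hc2 : maxLen < i + (k+1) := by omega
                have htk : (u.drop i).take (maxLen - i)
                    = u[i] :: (u.drop (i+1)).take (maxLen - (i+1)) := by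
                  rw [hdrop]
                  have hsub : maxLen - i = (maxLen - (i+1)) + 1 := by omega
                  rw [hsub, List.take_succ_cons]
                rw [if_pos hcc, if_pos hc2, htk, hgd]
                simp only [List.cons_append]
              · have hc2 : ¬ maxLen < i + (k+1) := by omega
                have htk : (u.drop i).take (k+1) = u[i] :: (u.drop (i+1)).take k := by
                  rw [hdrop, List.take_succ_cons]
                rw [if_neg hcc, if_neg hc2, htk, hgd]
        · -- first difference found at i
          have h1 : hpdFirstDiff u r (min (i + (k+1)) maxLen) i = some i := by
            unfold hpdFirstDiff; rw [if_pos hc, if_pos heq]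
          rw [h1]
          simp only [hpdRender, Nat.sub_self, List.take_zero, List.nil_append, hpdLoopA,
            if_neg hni, if_neg heq]

theorem highlight_pi_difference_eq (user_pi reference_pi : String) (digits : Int) :
    highlight_pi_difference user_pi reference_pi digits
      = highlight_pi_difference_alt user_pi reference_pi digits := by
  unfold highlight_pi_difference highlight_pi_difference_alt
  have hmlu : min user_pi.toList.length reference_pi.toList.length ≤ user_pi.toList.length := by
    omega
  have hhi : (min (digits + 2) ((min user_pi.toList.length reference_pi.toList.length : Nat) : Int)).toNat
      = min (0 + (digits + 2).toNat) (min user_pi.toList.length reference_pi.toList.length) := by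
    omega
  rw [hpdLoopA_eq user_pi.toList reference_pi.toList digits _ hmlu ((digits + 2).toNat) 0 (by omega),
      ← hhi]
  cases hfd : hpdFirstDiff user_pi.toList reference_pi.toList
      ((min (digits + 2) ((min user_pi.toList.length reference_pi.toList.length : Nat) : Int)).toNat) 0 with
  | some d =>
      simp only [hpdRender]
      rw [PySem.List.slice_to_natCast]
      simp only [Nat.sub_zero, List.drop_zero, List.append_assoc]
  | none =>
      simp only [hpdRender]
      by_cases hc : ((min user_pi.toList.length reference_pi.toList.length : Nat) : Int) < digits + 2
      · have hc2 : min user_pi.toList.length reference_pi.toList.length < 0 + (digits + 2).toNat := by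
          omega
        rw [if_pos hc2, if_pos hc, PySem.List.slice_to_natCast]
        simp only [Nat.sub_zero, List.drop_zero, List.append_assoc]
      · have hc2 : ¬ min user_pi.toList.length reference_pi.toList.length < 0 + (digits + 2).toNat := by
          omega
        have hmax : (0 : Int) ≤ max (digits + 2) 0 := by omega
        have htn : (max (digits + 2) 0).toNat = (digits + 2).toNat := by omega
        rw [if_neg hc2, if_neg hc, PySem.List.slice_to _ hmax, htn]
        simp only [List.drop_zero, List.append_assoc]

-- ===== VERDICT (by name: the statement is the Claim_ definition above) =====
theorem highlight_pi_difference_spec : Claim_equal_highlight_pi_difference := by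
  intro u r d _
  unfold Spec_highlight_pi_difference
  exact highlight_pi_difference_eq u r d
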